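-- pv_equiv track=rewrite | github.com/Komdix/bekap_wins | bakap_nadruhu/kodikovanie/old/3rd_block/12/p6_composite.py | highly_composite
-- ===== SOURCE A (Python) =====
-- def count_divisors(n: int) -> int:
--     """Count the number of divisors of a given number."""
--     count = 0
--     for i in range(1, n + 1):
--         if n % i == 0:
--             count += 1
--     return count
--
-- def highly_composite(numbers: set[int]) -> set[int]:
--     """Return the set of highly composite numbers from the input set."""
--     sorted_numbers = sorted(numbers)
--     highly_composite_numbers = set()
--
--     for number in sorted_numbers:
--         divisors = count_divisors(number)
--         is_highly_composite = True
--         for smaller in sorted_numbers: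
--             if smaller >= number:
--                 break
--             if divisors <= count_divisors(smaller):
--                 is_highly_composite = False
--                 break
--         if is_highly_composite:
--             highly_composite_numbers.add(number)
--
--     return highly_composite_numbers
-- ===== SOURCE B (Python) =====
-- def divisor_count(n: int) -> int:
--     """Number of divisors of n (0 for n <= 0, as in the original's loop)."""
--     return len([i for i in range(1, n + 1) if n % i == 0])
--
--
-- def highly_composite(numbers: set[int]) -> set[int]:
--     """Return the set of highly composite numbers from the input set.
--
--     One pass over the sorted numbers: count each number's divisors once and
--     keep it iff its divisor count beats the running maximum of all smaller
--     numbers' counts.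
--     """
--     result = set()
--     best = -1
--     for number in sorted(numbers):
--         divisors = divisor_count(number)
--         if divisors > best:
--             result.add(number)
--             best = divisors
--     return result
-- ===== Notes on version B (the rewrite author's own statement) =====
-- stated objective: faster
-- what changed: Instead of re-counting divisors of every smaller number inside a nested scan, B counts each number's divisors once and makes a single pass over the sorted numbers keeping a running maximum divisor count.
import Mathlib
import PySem

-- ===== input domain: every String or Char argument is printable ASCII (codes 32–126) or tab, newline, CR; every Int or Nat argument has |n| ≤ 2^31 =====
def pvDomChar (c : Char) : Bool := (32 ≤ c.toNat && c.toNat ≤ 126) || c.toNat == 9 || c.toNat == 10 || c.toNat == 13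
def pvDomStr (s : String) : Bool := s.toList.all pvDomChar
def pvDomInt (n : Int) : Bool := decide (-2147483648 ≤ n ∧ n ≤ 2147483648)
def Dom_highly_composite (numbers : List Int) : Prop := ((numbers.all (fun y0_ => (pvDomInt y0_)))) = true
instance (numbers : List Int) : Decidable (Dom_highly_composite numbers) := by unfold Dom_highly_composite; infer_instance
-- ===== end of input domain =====

-- B replaces A's nested re-counting scan by one divisor count per number and a single
-- pass with a running maximum divisor count (objective: faster).

-- ===== PORT A =====
def count_divisors (n : Int) : Int :=
  (PySem.List.pyRange 1 (n + 1) 1).foldl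
    (fun count i => if PySem.Int.mod n i == 0 then count + 1 else count) 0

-- inner 'for smaller in sorted_numbers' loop with its two breaks
def hcCheck (sorted_numbers : List Int) (number divisors : Int) : Bool :=
  match sorted_numbers with
  | [] => true
  | smaller :: rest =>
    if smaller ≥ number then true
    else if divisors ≤ count_divisors smaller then false
    else hcCheck rest number divisors

def highly_composite (numbers : List Int) : List Int :=
  let sorted_numbers := PySem.List.sorted numbers (fun x => x) false
  sorted_numbers.foldl
    (fun highly_composite_numbers number =>
      let divisors := count_divisors number
      if hcCheck sorted_numbers number divisors then
        PySem.Set.add highly_composite_numbers number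
      else highly_composite_numbers)
    PySem.Set.empty

-- ===== PORT B =====
def divisor_count (n : Int) : Int :=
  ((PySem.List.pyRange 1 (n + 1) 1).filter (fun i => PySem.Int.mod n i == 0)).length

def highly_composite_alt (numbers : List Int) : List Int :=
  ((PySem.List.sorted numbers (fun x => x) false).foldl
    (fun st number =>
      let divisors := divisor_count number
      if divisors > st.2 then (PySem.Set.add st.1 number, divisors) else st)
    ((PySem.Set.empty : PySem.Set Int), (-1 : Int))).1

-- ===== PRECONDITION & SPEC =====
def Spec_highly_composite (numbers : List Int) (out : List Int) : Prop := out = highly_composite_alt numbers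
instance (numbers : List Int) (out : List Int) : Decidable (Spec_highly_composite numbers out) := by unfold Spec_highly_composite; infer_instance

-- ===== CLAIM (what is proved, stated in full; the proofs are below) =====
def Claim_equal_highly_composite : Prop := ∀ (numbers : List Int), Dom_highly_composite numbers → Spec_highly_composite numbers (highly_composite numbers)

-- ===== LEMMAS AND PROOFS =====

-- B's comprehension-length counter computes A's loop counter
lemma divisor_count_eq (n : Int) : divisor_count n = count_divisors n := by
  unfold divisor_count count_divisors
  rw [PySem.List.foldl_if_add_one]
  simp [List.countP_eq_length_filter]

lemma count_divisors_nonneg (n : Int) : 0 ≤ count_divisors n := by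
  unfold count_divisors
  rw [PySem.List.foldl_if_add_one]
  positivity

-- running maximum of divisor counts over the already-processed prefix of the sorted list
def maxcd (p : List Int) : Int := p.foldl (fun b x => max b (count_divisors x)) (-1)

-- A's verdict for `n` relative to the prefix `p` of the sorted list
def V (p : List Int) (n : Int) : Prop :=
  ∀ x ∈ p, x < n → count_divisors x < count_divisors n

lemma hcCheck_eq (p : List Int) (t : List Int) (n d : Int)
    (hp : p.Pairwise (· ≤ ·)) (hle : ∀ x ∈ p, x ≤ n) :
    hcCheck (p ++ n :: t) n d = true ↔ ∀ x ∈ p, x < n → count_divisors x < d := by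
  induction p with
  | nil => simp [hcCheck]
  | cons x p ih =>
    have hxp : ∀ y ∈ p, x ≤ y := fun y hy => (List.pairwise_cons.1 hp).1 y hy
    have hp' : p.Pairwise (· ≤ ·) := (List.pairwise_cons.1 hp).2
    by_cases hxn : x ≥ n
    · simp only [List.cons_append, hcCheck, if_pos hxn]
      constructor
      · intro _ y hy hyn
        rcases List.mem_cons.1 hy with rfl | hy'
        · omega
        · exact absurd (lt_of_le_of_lt (le_trans hxn (hxp y hy')) hyn) (lt_irrefl n)
      · intro _; trivial
    · push Not at hxn
      simp only [List.cons_append, hcCheck, if_neg (not_le.2 hxn)]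
      by_cases hdx : d ≤ count_divisors x
      · simp only [if_pos hdx]
        constructor
        · intro h; exact absurd h (by simp)
        · intro h; exact absurd (h x List.mem_cons_self hxn) (by omega)
      · simp only [if_neg hdx]
        rw [ih hp' (fun y hy => hle y (List.mem_cons_of_mem _ hy))]
        constructor
        · intro h y hy hyn
          rcases List.mem_cons.1 hy with rfl | hy'
          · omega
          · exact h y hy' hyn
        · intro h y hy hyn; exact h y (List.mem_cons_of_mem _ hy) hyn

lemma maxcd_append (p : List Int) (m : Int) :
    maxcd (p ++ [m]) = max (maxcd p) (count_divisors m) := by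
  unfold maxcd; rw [List.foldl_append]; rfl

lemma le_maxcd_of_mem {p : List Int} {x : Int} (hx : x ∈ p) :
    count_divisors x ≤ maxcd p :=
  (PySem.List.le_foldl_max_int p count_divisors (-1)).2 x hx

lemma foldl_max_lt (c : Int) (p : List Int) :
    ∀ init : Int, init < c → (∀ x ∈ p, count_divisors x < c) →
    p.foldl (fun b x => max b (count_divisors x)) init < c := by
  induction p with
  | nil => intro init h _; exact h
  | cons x p ih =>
    intro init h hall
    exact ih _ (max_lt h (hall x List.mem_cons_self))
      (fun y hy => hall y (List.mem_cons_of_mem _ hy))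

lemma maxcd_lt_iff (p : List Int) (m : Int) (hle : ∀ x ∈ p, x ≤ m) :
    maxcd p < count_divisors m ↔ m ∉ p ∧ V p m := by
  constructor
  · intro h
    refine ⟨fun hm => absurd (le_maxcd_of_mem hm) (by omega), fun x hx _ =>
      lt_of_le_of_lt (le_maxcd_of_mem hx) h⟩
  · rintro ⟨hnm, hV⟩
    refine foldl_max_lt _ _ _ (by have := count_divisors_nonneg m; omega) ?_
    intro x hx
    have hxm : x < m := lt_of_le_of_ne (hle x hx) (fun h => hnm (h ▸ hx))
    exact hV x hx hxm

lemma main_loop (s : List Int) (hs : s.Pairwise (· ≤ ·)) :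
    ∀ (l p acc : List Int), s = p ++ l →
    (∀ x ∈ acc, x ∈ p) → (∀ n ∈ p, V p n → n ∈ acc) →
    l.foldl
      (fun highly_composite_numbers number =>
        let divisors := count_divisors number
        if hcCheck s number divisors then
          PySem.Set.add highly_composite_numbers number
        else highly_composite_numbers) acc
    = (l.foldl
        (fun st number =>
          let divisors := divisor_count number
          if divisors > st.2 then (PySem.Set.add st.1 number, divisors) else st)
        (acc, maxcd p)).1 := by
  intro l
  induction l with
  | nil => intro p acc _ _ _; rfl
  | cons m t ih =>
    intro p acc hseq hinv3 hinv4
    have hsp := hseq ▸ hs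
    have hp : p.Pairwise (· ≤ ·) := (List.pairwise_append.1 hsp).1
    have hpm : ∀ x ∈ p, x ≤ m :=
      fun x hx => (List.pairwise_append.1 hsp).2.2 x hx m List.mem_cons_self
    have hseq' : s = (p ++ [m]) ++ t := by rw [hseq]; simp
    have hcA : hcCheck s m (count_divisors m) = true ↔ V p m := by
      rw [hseq]; exact hcCheck_eq p t m (count_divisors m) hp hpm
    have hcB : (divisor_count m > maxcd p) ↔ (m ∉ p ∧ V p m) := by
      rw [divisor_count_eq]; exact maxcd_lt_iff p m hpm
    simp only [List.foldl_cons]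
    by_cases hVm : V p m
    · by_cases hmp : m ∈ p
      · -- duplicate of an already-kept number: both sides leave their state unchanged
        have hmacc : m ∈ acc := hinv4 m hmp hVm
        have hA : hcCheck s m (count_divisors m) = true := hcA.2 hVm
        have hadd : PySem.Set.add acc m = acc := by
          simp [PySem.Set.add, PySem.Set.contains, hmacc]
        have hB : ¬ (divisor_count m > maxcd p) := fun h => (hcB.1 h).1 hmp
        have hmax : maxcd (p ++ [m]) = maxcd p := by
          rw [maxcd_append]; exact max_eq_left (le_maxcd_of_mem hmp)
        simp only [hA, if_pos, if_neg hB, hadd]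
        rw [← hmax]
        exact ih (p ++ [m]) acc hseq'
          (fun x hx => List.mem_append_left _ (hinv3 x hx))
          (fun n hn hVn => by
            rcases List.mem_append.1 hn with hn' | hn'
            · exact hinv4 n hn' (fun x hx => hVn x (List.mem_append_left _ hx))
            · have : n = m := by simpa using hn'
              exact this ▸ hmacc)
      · -- a new highly composite number: both sides add it
        have hA : hcCheck s m (count_divisors m) = true := hcA.2 hVm
        have hB : divisor_count m > maxcd p := hcB.2 ⟨hmp, hVm⟩
        have hmax : maxcd (p ++ [m]) = divisor_count m := by
          rw [maxcd_append, divisor_count_eq]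
          exact max_eq_right (le_of_lt (by rw [← divisor_count_eq]; exact hB))
        simp only [hA, if_pos, if_pos hB]
        rw [← hmax]
        exact ih (p ++ [m]) (PySem.Set.add acc m) hseq'
          (fun x hx => by
            rcases (PySem.Set.mem_add acc m x).1 hx with hx' | hx'
            · exact List.mem_append_left _ (hinv3 x hx')
            · simp [hx'])
          (fun n hn hVn => by
            rcases List.mem_append.1 hn with hn' | hn'
            · exact (PySem.Set.mem_add acc m n).2
                (Or.inl (hinv4 n hn' (fun x hx => hVn x (List.mem_append_left _ hx))))
            · have : n = m := by simpa using hn'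
              exact (PySem.Set.mem_add acc m n).2 (Or.inr this))
    · -- not highly composite: both sides skip it
      have hA : ¬ hcCheck s m (count_divisors m) = true := fun h => hVm (hcA.1 h)
      have hB : ¬ (divisor_count m > maxcd p) := fun h => hVm (hcB.1 h).2
      have hmax : maxcd (p ++ [m]) = maxcd p := by
        rw [maxcd_append]
        refine max_eq_left ?_
        unfold V at hVm; push Not at hVm
        obtain ⟨x, hx, hxm, hcd⟩ := hVm
        exact le_trans hcd (le_maxcd_of_mem hx)
      simp only [if_neg hA, if_neg hB]
      rw [← hmax]
      exact ih (p ++ [m]) acc hseq'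
        (fun x hx => List.mem_append_left _ (hinv3 x hx))
        (fun n hn hVn => by
          rcases List.mem_append.1 hn with hn' | hn'
          · exact hinv4 n hn' (fun x hx => hVn x (List.mem_append_left _ hx))
          · exact absurd (fun x hx => hVn x (List.mem_append_left _ hx))
              ((by simpa using hn' : n = m) ▸ hVm))

-- ===== VERDICT (by name: the statement is the Claim_ definition above) =====
theorem highly_composite_spec : Claim_equal_highly_composite := by
  intro numbers _
  unfold Spec_highly_composite highly_composite highly_composite_alt
  exact main_loop _ (by simpa using PySem.List.sorted_pairwise numbers (fun x => x))
    _ [] _ rfl (by simp [PySem.Set.empty]) (by simp)
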